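-- pv_equiv track=rewrite | github.com/mchouai27/vlm-odd-pipeline | processing/preprocess_normalize.py | correct_yes_no_sequence
-- ===== SOURCE A (Python) =====
-- from typing import Any, Dict, List, Tuple
--
-- def correct_yes_no_sequence(sequence: List[Any], min_consecutive: int = 3) -> List[Any]:
--     """
--     Smooth short runs in a Yes/No sequence:
--       - For any block shorter than min_consecutive that differs from the previous
--         block value, flip it to the previous value.
--       - First element is trusted; corrections never look back beyond it.
--     """
--     corrected = list(sequence)
--     n = len(corrected)
--     i = 1  # start at 1 (first is trusted)
--     while i < n:
--         curr = corrected[i]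
--         count = 1
--         while (i + count) < n and corrected[i + count] == curr:
--             count += 1
--         if count < min_consecutive:
--             prev_val = corrected[i - 1]
--             if curr != prev_val:
--                 for j in range(i, i + count):
--                     corrected[j] = prev_val
--                 i += count
--                 continue
--         i += count
--     return corrected
-- ===== SOURCE B (Python) =====
-- def correct_yes_no_sequence(sequence, min_consecutive=3):
--     # Run-length encode once, then smooth block-by-block tracking the accepted value.
--     seq = list(sequence)
--     runs = []
--     i = 0
--     while i < len(seq):
--         j = i + 1
--         while j < len(seq) and seq[j] == seq[i]:
--             j += 1
--         runs.append((seq[i], j - i))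
--         i = j
--     if not runs:
--         return []
--     prev, c0 = runs[0]
--     out = [prev] * c0
--     for v, c in runs[1:]:
--         if c < min_consecutive and v != prev:
--             out.extend([prev] * c)
--         else:
--             out.extend([v] * c)
--             prev = v
--     return out
-- ===== Notes on version B (the rewrite author's own statement) =====
-- stated objective: alternative
-- what changed: A rewrites short runs in place while jumping an index over the array; B first run-length encodes the sequence into (value, length) blocks in one pass and then emits blocks in a second pass, flipping a short block to the tracked accepted previous value.
import Mathlib
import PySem

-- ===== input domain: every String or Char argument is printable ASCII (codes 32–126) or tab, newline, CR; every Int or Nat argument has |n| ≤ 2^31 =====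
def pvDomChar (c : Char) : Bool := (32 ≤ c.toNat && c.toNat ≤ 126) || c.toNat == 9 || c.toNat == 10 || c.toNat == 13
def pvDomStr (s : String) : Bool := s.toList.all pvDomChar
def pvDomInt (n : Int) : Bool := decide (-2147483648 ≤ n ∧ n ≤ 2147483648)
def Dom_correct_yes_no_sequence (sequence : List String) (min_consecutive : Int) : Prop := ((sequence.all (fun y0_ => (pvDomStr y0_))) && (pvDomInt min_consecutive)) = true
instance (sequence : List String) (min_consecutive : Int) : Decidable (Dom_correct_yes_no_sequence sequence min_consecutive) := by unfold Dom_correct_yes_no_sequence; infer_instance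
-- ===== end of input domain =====

-- B replaces A's in-place index-jumping rewrite loop by a run-length-encoding pass
-- followed by a block-wise smoothing pass tracking the accepted previous value
-- (objective: alternative decomposition, same exact return value).

-- ===== PORT A =====
-- inner `count = 1; while (i + count) < n and corrected[i + count] == curr: count += 1`
def runCount (n : Nat) (corrected : List String) (i : Nat) (curr : String) (count : Nat) : Nat :=
  if h : i + count < n ∧ corrected.getD (i + count) "" == curr then
    runCount n corrected i curr (count + 1)
  else count
termination_by n - (i + count)
decreasing_by omega

lemma runCount_ge (n : Nat) (l : List String) (i : Nat) (x : String) (c : Nat) :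
    c ≤ runCount n l i x c := by
  fun_induction runCount n l i x c with
  | case1 cnt h ih => omega
  | case2 cnt h => omega

-- `for j in range(i, i + count): corrected[j] = prev_val`
def setRange (v : String) : List String → Nat → Nat → List String
  | l, _, 0 => l
  | l, i, c + 1 => setRange v (l.set i v) (i + 1) c

-- the outer `while i < n:` loop of A (`corrected` mutated in place, `i` jumps by count)
def loopA (mc : Int) (n : Nat) (corrected : List String) (i : Nat) : List String :=
  if h : i < n then
    if (runCount n corrected i (corrected.getD i "") 1 : Int) < mc then
      if corrected.getD i "" ≠ corrected.getD (i - 1) "" then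
        loopA mc n
          (setRange (corrected.getD (i - 1) "") corrected i
            (runCount n corrected i (corrected.getD i "") 1))
          (i + runCount n corrected i (corrected.getD i "") 1)
      else loopA mc n corrected (i + runCount n corrected i (corrected.getD i "") 1)
    else loopA mc n corrected (i + runCount n corrected i (corrected.getD i "") 1)
  else corrected
termination_by n - i
decreasing_by
  all_goals have := runCount_ge n corrected i (corrected.getD i "") 1; omega

def correct_yes_no_sequence (sequence : List String) (min_consecutive : Int) : List String :=
  loopA min_consecutive sequence.length sequence 1

-- ===== PORT B =====
-- first pass of Source B: run-length encode the sequence into (value, run length) blocks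
def rle : List String → List (String × Nat)
  | [] => []
  | x :: xs => (x, 1 + (xs.takeWhile (· == x)).length) :: rle (xs.dropWhile (· == x))
termination_by l => l.length
decreasing_by
  have := List.length_dropWhile_le (· == x) xs
  simp; omega

-- second pass of Source B: smooth blocks while tracking the accepted previous value
def smooth (mc : Int) (prev : String) : List (String × Nat) → List String
  | [] => []
  | (v, c) :: bs =>
    if (c : Int) < mc ∧ v ≠ prev then List.replicate c prev ++ smooth mc prev bs
    else List.replicate c v ++ smooth mc v bs

def correct_yes_no_sequence_alt (sequence : List String) (min_consecutive : Int) : List String :=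
  match rle sequence with
  | [] => []
  | (v, c) :: bs => List.replicate c v ++ smooth min_consecutive v bs

-- ===== PRECONDITION & SPEC =====
def Spec_correct_yes_no_sequence (sequence : List String) (min_consecutive : Int) (out : List String) : Prop := out = correct_yes_no_sequence_alt sequence min_consecutive
instance (sequence : List String) (min_consecutive : Int) (out : List String) : Decidable (Spec_correct_yes_no_sequence sequence min_consecutive out) := by unfold Spec_correct_yes_no_sequence; infer_instance

-- ===== CLAIM (what is proved, stated in full; the proofs are below) =====
def Claim_equal_correct_yes_no_sequence : Prop := ∀ (sequence : List String) (min_consecutive : Int), Dom_correct_yes_no_sequence sequence min_consecutive → Spec_correct_yes_no_sequence sequence min_consecutive (correct_yes_no_sequence sequence min_consecutive)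

-- ===== LEMMAS AND PROOFS =====

lemma runCount_eq (n : Nat) (l : List String) (i : Nat) (x : String) (c : Nat)
    (hn : n = l.length) :
    runCount n l i x c = c + ((l.drop (i + c)).takeWhile (· == x)).length := by
  fun_induction runCount n l i x c with
  | case1 c h ih =>
    rw [ih]
    obtain ⟨hlt, hbeq⟩ := h
    have hlt' : i + c < l.length := hn ▸ hlt
    rw [List.drop_eq_getElem_cons hlt']
    rw [List.getD_eq_getElem l "" hlt'] at hbeq
    simp only [List.takeWhile_cons, hbeq]
    rw [show i + (c + 1) = i + c + 1 from by omega]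
    simp; omega
  | case2 c h =>
    by_cases hlt : i + c < n
    · have hbeq : ¬ (l.getD (i + c) "" == x) = true := by tauto
      have hlt' : i + c < l.length := hn ▸ hlt
      rw [List.drop_eq_getElem_cons hlt']
      rw [List.getD_eq_getElem l "" hlt'] at hbeq
      simp [hbeq]
    · have : l.length ≤ i + c := by omega
      rw [List.drop_eq_nil_of_le this]
      simp

lemma setRange_eq (v : String) (done run rest : List String) :
    setRange v (done ++ run ++ rest) done.length run.length
      = done ++ List.replicate run.length v ++ rest := by
  induction run generalizing done with
  | nil => simp [setRange]
  | cons r rs ih =>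
    show setRange v ((done ++ r :: rs ++ rest).set done.length v) (done.length + 1) rs.length = _
    have hset : (done ++ r :: rs ++ rest).set done.length v
        = (done ++ [v]) ++ rs ++ rest := by simp
    rw [hset]
    have hlen : done.length + 1 = (done ++ [v]).length := by simp
    rw [hlen, ih (done ++ [v])]
    simp [List.replicate_succ]

lemma takeWhile_replicate (x : String) (xs : List String) :
    xs.takeWhile (· == x) = List.replicate (xs.takeWhile (· == x)).length x := by
  apply List.eq_replicate_of_mem
  intro b hb
  have hbx : (b == x) = true := List.mem_takeWhile_imp (p := (· == x)) hb
  exact eq_of_beq hbx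

lemma getD_append_len (done rest : List String) (x : String) :
    (done ++ x :: rest).getD done.length "" = x := by
  simp [List.getD]

lemma getD_append_pred (done rest : List String) (h : done ≠ []) :
    (done ++ rest).getD (done.length - 1) "" = done.getLastD "" := by
  have hlen : 0 < done.length := List.length_pos_of_ne_nil h
  have hlt : done.length - 1 < done.length := by omega
  rw [List.getD, List.getElem?_append_left hlt]
  rw [List.getLastD_eq_getLast?, List.getLast?_eq_getElem?]

lemma getLastD_append_ne_nil (a b : List String) (h : b ≠ []) (d : String) :
    (a ++ b).getLastD d = b.getLastD d := by
  rw [List.getLastD_eq_getLast?, List.getLastD_eq_getLast?,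
    List.getLast?_append_of_ne_nil a h]

lemma getLastD_replicate (c : Nat) (hc : c ≠ 0) (v d : String) :
    (List.replicate c v).getLastD d = v := by
  match c with
  | m + 1 => simp [List.getLastD_eq_getLast?, List.getLast?_replicate]

lemma drop_append_len_succ (done : List String) (x : String) (xs : List String) :
    (done ++ x :: xs).drop (done.length + 1) = xs := by
  rw [List.drop_append]
  simp [List.drop_eq_nil_of_le]

lemma loop_inv (mc : Int) : ∀ (k : Nat) (rest done : List String), rest.length ≤ k → done ≠ [] →
    loopA mc (done.length + rest.length) (done ++ rest) done.length
      = done ++ smooth mc (done.getLastD "") (rle rest) := by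
  intro k
  induction k with
  | zero =>
    intro rest done hk _
    have : rest = [] := List.eq_nil_of_length_eq_zero (by omega)
    subst this
    rw [loopA]
    simp [rle, smooth]
  | succ k ih =>
    intro rest done hk hne
    match rest with
    | [] =>
      rw [loopA]; simp [rle, smooth]
    | x :: xs =>
      set t := xs.takeWhile (· == x) with ht
      set d := xs.dropWhile (· == x) with hd
      have htd : xs = t ++ d := (List.takeWhile_append_dropWhile).symm
      set c : Nat := 1 + t.length with hc
      have hdlen : d.length ≤ xs.length := List.length_dropWhile_le _ _
      have hkd : d.length ≤ k := by simp at hk; omega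
      have hn : (done ++ x :: xs).length = done.length + (x :: xs).length := by simp
      have hi : done.length < done.length + (x :: xs).length := by simp
      have hcurr : (done ++ x :: xs).getD done.length "" = x := getD_append_len done xs x
      have hcount : runCount (done.length + (x :: xs).length) (done ++ x :: xs) done.length
          ((done ++ x :: xs).getD done.length "") 1 = c := by
        rw [hcurr, runCount_eq _ _ _ _ _ hn.symm, drop_append_len_succ]
      have hprev : (done ++ x :: xs).getD (done.length - 1) "" = done.getLastD "" :=
        getD_append_pred done (x :: xs) hne
      have hrle : rle (x :: xs) = (x, c) :: rle d := by rw [rle]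
      have h1 : t = List.replicate t.length x := by
        rw [ht]; exact takeWhile_replicate x xs
      have hxt : x :: t = List.replicate c x := by
        rw [hc, Nat.add_comm, List.replicate_succ, ← h1]
      have hlen_t : (x :: t).length = c := by simp [hc, Nat.add_comm]
      have hxslen : xs.length = t.length + d.length := by
        have := congrArg List.length htd; simpa using this
      set prev := done.getLastD "" with hpv
      -- the generic "keep this block" continuation
      have hkeep : loopA mc (done.length + (x :: xs).length) (done ++ x :: xs) (done.length + c)
          = done ++ (List.replicate c x ++ smooth mc x (rle d)) := by
        have hsplit : done ++ x :: xs = (done ++ List.replicate c x) ++ d := by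
          rw [htd, ← hxt]; simp
        have hlen' : done.length + c = (done ++ List.replicate c x).length := by simp
        have hlast : (done ++ List.replicate c x).getLastD "" = x := by
          rw [getLastD_append_ne_nil _ _ (by simp [hc])]
          exact getLastD_replicate c (by omega) x ""
        rw [hsplit, hlen']
        have := ih d (done ++ List.replicate c x) hkd (by simp [hne])
        rw [show (done ++ List.replicate c x).length + d.length
            = done.length + (x :: xs).length by
              simp only [List.length_append, List.length_replicate, List.length_cons]
              omega] at this
        rw [this, hlast]
        simp
      rw [loopA, dif_pos hi, hcount, hcurr, hprev, hrle]
      by_cases hmc : (c : Int) < mc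
      · rw [if_pos hmc]
        by_cases hxp : x = prev
        · -- short block equal to previous value: kept
          rw [if_neg (by simpa using hxp)]
          rw [hkeep, smooth, if_neg (by simp [hxp])]
        · -- short block different from previous value: flipped to prev
          rw [if_pos (by simpa using hxp)]
          have hsplit : done ++ x :: xs = done ++ (x :: t) ++ d := by rw [htd]; simp
          have hset : setRange prev (done ++ x :: xs) done.length c
              = done ++ List.replicate c prev ++ d := by
            rw [hsplit, ← hlen_t, setRange_eq, hlen_t]
          rw [hset]
          have hlen' : done.length + c = (done ++ List.replicate c prev).length := by simp
          have hlast : (done ++ List.replicate c prev).getLastD "" = prev := by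
            rw [getLastD_append_ne_nil _ _ (by simp [hc])]
            exact getLastD_replicate c (by omega) prev ""
          rw [hlen']
          have := ih d (done ++ List.replicate c prev) hkd (by simp [hne])
          rw [show (done ++ List.replicate c prev).length + d.length
              = done.length + (x :: xs).length by
                simp only [List.length_append, List.length_replicate, List.length_cons]
                omega] at this
          rw [this, hlast]
          rw [smooth, if_pos ⟨hmc, hxp⟩]
          simp
      · -- long block: kept
        rw [if_neg hmc, hkeep, smooth, if_neg (by tauto)]

lemma alt_eq (seq : List String) (mc : Int) :
    correct_yes_no_sequence_alt seq mc
      = match seq with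
        | [] => []
        | v :: rest => v :: smooth mc v (rle rest) := by
  match seq with
  | [] => simp [correct_yes_no_sequence_alt, rle]
  | v :: rest =>
    show (match rle (v :: rest) with
      | [] => []
      | (w, c) :: bs => List.replicate c w ++ smooth mc w bs) = v :: smooth mc v (rle rest)
    rw [rle]
    match rest with
    | [] => simp [rle, smooth]
    | y :: ys =>
      by_cases hyv : (y == v) = true
      · have hy : y = v := eq_of_beq hyv
        subst hy
        rw [show rle (y :: ys) = (y, 1 + (ys.takeWhile (· == y)).length) :: rle (ys.dropWhile (· == y)) from by rw [rle]]
        rw [smooth, if_neg (by simp)]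
        simp only [List.takeWhile_cons, List.dropWhile_cons, hyv, if_pos, List.length_cons]
        rw [show 1 + ((List.takeWhile (fun x => x == y) ys).length + 1)
            = (1 + (List.takeWhile (fun x => x == y) ys).length) + 1 from by omega]
        simp [List.replicate_succ]
      · simp only [List.takeWhile_cons, List.dropWhile_cons, hyv]
        simp

-- ===== VERDICT (by name: the statement is the Claim_ definition above) =====
theorem correct_yes_no_sequence_spec : Claim_equal_correct_yes_no_sequence := by
  intro seq mc _
  unfold Spec_correct_yes_no_sequence correct_yes_no_sequence
  rw [alt_eq]
  match seq with
  | [] => rw [loopA]; simp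
  | v :: rest =>
    have h := loop_inv mc rest.length rest [v] (le_refl _) (by simp)
    simpa [Nat.add_comm] using h
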